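-- pv_equiv track=rewrite | github.com/kimhs0716/BOJ | 백준/Silver/27275. Баскетбол/Баскетбол.py | f
-- ===== SOURCE A (Python) =====
-- def f(arr, m, p):
--     n = len(arr)
--     ret = [1]*p + [0]*(n-p)
--     time = [0]*n
--     for _ in range(m):
--         for i in range(n):
--             time[i] += ret[i]
--         out_idx = -1
--         in_idx = -1
--         for i in range(n):
--             if ret[i]:
--                 if out_idx == -1: out_idx = i
--                 else:
--                     out_idx = max(out_idx, i, key=lambda x: (time[x], x))
--             else:
--                 if in_idx == -1: in_idx = i
--                 else:
--                     in_idx = min(in_idx, i, key=lambda x: (time[x], x))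
--         ret[out_idx] = 0
--         ret[in_idx] = 1
--     return [arr[i] for i in range(n) if ret[i]]
-- ===== SOURCE B (Python) =====
-- def f(arr, m, p):
--     # Two rosters of (stored_time, index) pairs; a global round offset makes the
--     # per-round "+1 for everyone on court" implicit, so no time array is rescanned.
--     n = len(arr)
--     on = []
--     off = []
--     for i in range(n):
--         if i < p:
--             on.append((0, i))
--         else:
--             off.append((0, i))
--     for k in range(1, m + 1):
--         tin = min(off)
--         tout = max(on)
--         off.remove(tin)
--         on.remove(tout)
--         on.append((tin[0] - k, tin[1]))
--         off.append((tout[0] + k, tout[1]))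
--     return [arr[i] for i in sorted(i for _, i in on)]
-- ===== Notes on version B (the rewrite author's own statement) =====
-- stated objective: alternative
-- what changed: B replaces A's per-round O(n) time-array increment and sentinel argmin/argmax scans over a 0/1 flag array by two explicit rosters of (stored-time, index) pairs with a global round offset, so each round is just min()/max() over the rosters plus one remove/append per roster.
-- outside the precondition, e.g. on f([5, 6], 1, 0): A returns [5], B raises ValueError; on f([5, 6], 1, 2): A returns [5, 6], B raises ValueError; on f([5], 1, 3): A returns [], B raises ValueError
import Mathlib
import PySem

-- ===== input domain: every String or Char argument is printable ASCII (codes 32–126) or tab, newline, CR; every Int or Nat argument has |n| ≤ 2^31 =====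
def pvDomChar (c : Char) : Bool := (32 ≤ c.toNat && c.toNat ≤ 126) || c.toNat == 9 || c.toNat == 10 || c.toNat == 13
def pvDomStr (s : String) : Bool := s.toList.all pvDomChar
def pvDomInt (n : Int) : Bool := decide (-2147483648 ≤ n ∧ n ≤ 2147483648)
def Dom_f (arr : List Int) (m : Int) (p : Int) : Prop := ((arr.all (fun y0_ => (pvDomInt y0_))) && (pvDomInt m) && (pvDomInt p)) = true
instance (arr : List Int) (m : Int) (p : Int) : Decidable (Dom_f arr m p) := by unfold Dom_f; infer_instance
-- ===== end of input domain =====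

-- B replaces A's per-round whole-array time increment and sentinel scans by two
-- rosters of (stored-time, index) pairs with a global round offset (alternative
-- decomposition; equal return values on Pre_f).

-- ===== PORT A =====
-- Python tuple comparison (time[x], x) < (time[y], y)
def lexLtB (a b : Int × Int) : Bool :=
  a.1 < b.1 || (a.1 == b.1 && a.2 < b.2)

-- one round of A: increment time for on-court, scan for out_idx/in_idx, swap
def incLoop (ret time : List Int) (n : Int) : List Int :=
  (PySem.List.pyRange 0 n 1).foldl
    (fun t i => PySem.List.pySetD t i (PySem.List.pyGetD t i 0 + PySem.List.pyGetD ret i 0)) time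

def scanLoop (ret time1 : List Int) (n : Int) : Int × Int :=
  (PySem.List.pyRange 0 n 1).foldl
    (fun (s : Int × Int) i =>
      if PySem.List.pyGetD ret i 0 ≠ 0 then
        if s.1 = -1 then (i, s.2)
        else (if lexLtB (PySem.List.pyGetD time1 s.1 0, s.1) (PySem.List.pyGetD time1 i 0, i) then i else s.1, s.2)
      else
        if s.2 = -1 then (s.1, i)
        else (s.1, if lexLtB (PySem.List.pyGetD time1 i 0, i) (PySem.List.pyGetD time1 s.2 0, s.2) then i else s.2))
    (-1, -1)

def stepA (ret time : List Int) (n : Int) : List Int × List Int :=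
  let time1 := incLoop ret time n
  let oi := scanLoop ret time1 n
  (PySem.List.pySetD (PySem.List.pySetD ret oi.1 0) oi.2 1, time1)

def outLoop (arr ret : List Int) (n : Int) : List Int :=
  (PySem.List.pyRange 0 n 1).foldl
    (fun acc i => if PySem.List.pyGetD ret i 0 ≠ 0 then acc ++ [PySem.List.pyGetD arr i 0] else acc) []

def f (arr : List Int) (m : Int) (p : Int) : List Int :=
  let n : Int := (arr.length : Int)
  let ret0 : List Int := List.replicate p.toNat 1 ++ List.replicate (n - p).toNat 0
  let time0 : List Int := List.replicate n.toNat 0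
  let st := (PySem.List.pyRange 0 m 1).foldl (fun st _ => stepA st.1 st.2 n) (ret0, time0)
  outLoop arr st.1 n

-- ===== PORT B =====
-- one round of B: move min of off-court in, max of on-court out (k = 1-based round)
def stepB (on off : List (Int × Int)) (k : Int) : List (Int × Int) × List (Int × Int) :=
  match PySem.List.min2? off Prod.fst Prod.snd, PySem.List.max2? on Prod.fst Prod.snd with
  | some tin, some tout =>
      ((PySem.List.remove? on tout).getD on ++ [(tin.1 - k, tin.2)],
       (PySem.List.remove? off tin).getD off ++ [(tout.1 + k, tout.2)])
  | _, _ => (on, off)   -- Python's min/max raise ValueError on an empty roster; outside Pre_f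

def f_alt (arr : List Int) (m : Int) (p : Int) : List Int :=
  let n : Int := (arr.length : Int)
  let st0 := (PySem.List.pyRange 0 n 1).foldl
    (fun (st : List (Int × Int) × List (Int × Int)) i =>
      if i < p then (st.1 ++ [((0 : Int), i)], st.2) else (st.1, st.2 ++ [((0 : Int), i)]))
    ([], [])
  let st := (PySem.List.pyRange 1 (m + 1) 1).foldl (fun st k => stepB st.1 st.2 k) st0
  (PySem.List.sorted (st.1.map Prod.snd) (fun i => i)).map (fun i => PySem.List.pyGetD arr i 0)

-- ===== PRECONDITION & SPEC =====
-- Pre_f admits the real substitution domain (0 < p < len(arr)) plus all inputs with no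
-- rounds (m <= 0): outside it a round runs with an empty roster, where A's sentinel stays
-- -1 and writes ret[-1] (negative-index wrap, or IndexError on []) while B's min()/max()
-- of the empty roster raises ValueError.
def Pre_f (arr : List Int) (m : Int) (p : Int) : Prop :=
  (0 < p ∧ p < (arr.length : Int)) ∨ m ≤ 0
instance (arr : List Int) (m : Int) (p : Int) : Decidable (Pre_f arr m p) := by unfold Pre_f; infer_instance
def pvWitness_f : List Int × Int × Int := ([3, 1, 4], 2, 1)

def Spec_f (arr : List Int) (m : Int) (p : Int) (out : List Int) : Prop := out = f_alt arr m p
instance (arr : List Int) (m : Int) (p : Int) (out : List Int) : Decidable (Spec_f arr m p out) := by unfold Spec_f; infer_instance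

-- ===== CLAIM (what is proved, stated in full; the proofs are below) =====
def Claim_equal_f : Prop := ∀ (arr : List Int) (m : Int) (p : Int), Dom_f arr m p → Pre_f arr m p → Spec_f arr m p (f arr m p)

-- ===== LEMMAS AND PROOFS =====

-- lexicographic ≤ on Int × Int (Python tuple order)
def lexLe (a b : Int × Int) : Prop := a.1 < b.1 ∨ (a.1 = b.1 ∧ a.2 ≤ b.2)

theorem lexLe_refl (a : Int × Int) : lexLe a a := by
  unfold lexLe; omega

theorem lexLe_trans {a b c : Int × Int} (h1 : lexLe a b) (h2 : lexLe b c) : lexLe a c := by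
  unfold lexLe at *; omega

theorem lexLe_antisymm {a b : Int × Int} (h1 : lexLe a b) (h2 : lexLe b a) : a = b := by
  obtain ⟨a1, a2⟩ := a; obtain ⟨b1, b2⟩ := b
  unfold lexLe at *; simp_all; omega

theorem lexLe_total (a b : Int × Int) : lexLe a b ∨ lexLe b a := by
  unfold lexLe; omega

theorem lexLtB_iff (a b : Int × Int) : lexLtB a b = true ↔ ¬ lexLe b a := by
  obtain ⟨a1, a2⟩ := a; obtain ⟨b1, b2⟩ := b
  simp [lexLtB, lexLe]; omega

theorem minFoldAux (t : List (Int × Int)) : ∀ (m0 : Int × Int),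
    ∃ r, t.foldl (fun acc x =>
        match acc with
        | none => some x
        | some m => if (decide (x.1 < m.1) || (!decide (m.1 < x.1) && decide (x.2 < m.2))) = true then some x else some m)
      (some m0) = some r ∧ (r = m0 ∨ r ∈ t) ∧ lexLe r m0 ∧ ∀ y ∈ t, lexLe r y := by
  induction t with
  | nil => intro m0; exact ⟨m0, rfl, Or.inl rfl, lexLe_refl m0, by simp⟩
  | cons a t ih =>
    intro m0
    have hcond : (decide (a.1 < m0.1) || (!decide (m0.1 < a.1) && decide (a.2 < m0.2))) = true ↔ ¬ lexLe m0 a := by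
      obtain ⟨a1, a2⟩ := a; obtain ⟨m1, m2⟩ := m0
      simp [lexLe]; omega
    by_cases hc : (decide (a.1 < m0.1) || (!decide (m0.1 < a.1) && decide (a.2 < m0.2))) = true
    · obtain ⟨r, hr, hmem, hle, hall⟩ := ih a
      refine ⟨r, ?_, ?_, ?_, ?_⟩
      · rw [List.foldl_cons]
        have : List.foldl (fun acc x =>
        match acc with
        | none => some x
        | some m => if (decide (x.1 < m.1) || (!decide (m.1 < x.1) && decide (x.2 < m.2))) = true then some x else some m)
            (some a) t = some r := hr
        rw [← this]
        congr 1
        exact if_pos hc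
      · rcases hmem with h | h
        · exact Or.inr (by simp [h])
        · exact Or.inr (by simp [h])
      · have hma : lexLe a m0 := (lexLe_total a m0).resolve_right (hcond.mp hc)
        exact lexLe_trans hle hma
      · intro y hy
        rcases List.mem_cons.mp hy with h | h
        · exact h ▸ hle
        · exact hall y h
    · obtain ⟨r, hr, hmem, hle, hall⟩ := ih m0
      refine ⟨r, ?_, ?_, ?_, ?_⟩
      · rw [List.foldl_cons]
        have : List.foldl (fun acc x =>
        match acc with
        | none => some x
        | some m => if (decide (x.1 < m.1) || (!decide (m.1 < x.1) && decide (x.2 < m.2))) = true then some x else some m)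
            (some m0) t = some r := hr
        rw [← this]
        congr 1
        exact if_neg hc
      · rcases hmem with h | h
        · exact Or.inl h
        · exact Or.inr (by simp [h])
      · exact hle
      · intro y hy
        rcases List.mem_cons.mp hy with h | h
        · subst h
          have hma : lexLe m0 y := by
            by_contra hno
            exact hc (hcond.mpr hno)
          exact lexLe_trans hle hma
        · exact hall y h

theorem maxFoldAux (t : List (Int × Int)) : ∀ (m0 : Int × Int),
    ∃ r, t.foldl (fun acc x =>
        match acc with
        | none => some x
        | some m => if (decide (m.1 < x.1) || (!decide (x.1 < m.1) && decide (m.2 < x.2))) = true then some x else some m)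
      (some m0) = some r ∧ (r = m0 ∨ r ∈ t) ∧ lexLe m0 r ∧ ∀ y ∈ t, lexLe y r := by
  induction t with
  | nil => intro m0; exact ⟨m0, rfl, Or.inl rfl, lexLe_refl m0, by simp⟩
  | cons a t ih =>
    intro m0
    have hcond : (decide (m0.1 < a.1) || (!decide (a.1 < m0.1) && decide (m0.2 < a.2))) = true ↔ ¬ lexLe a m0 := by
      obtain ⟨a1, a2⟩ := a; obtain ⟨m1, m2⟩ := m0
      simp [lexLe]; omega
    by_cases hc : (decide (m0.1 < a.1) || (!decide (a.1 < m0.1) && decide (m0.2 < a.2))) = true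
    · obtain ⟨r, hr, hmem, hle, hall⟩ := ih a
      refine ⟨r, ?_, ?_, ?_, ?_⟩
      · rw [List.foldl_cons]
        have : List.foldl (fun acc x =>
        match acc with
        | none => some x
        | some m => if (decide (m.1 < x.1) || (!decide (x.1 < m.1) && decide (m.2 < x.2))) = true then some x else some m)
            (some a) t = some r := hr
        rw [← this]
        congr 1
        exact if_pos hc
      · rcases hmem with h | h
        · exact Or.inr (by simp [h])
        · exact Or.inr (by simp [h])
      · have hma : lexLe m0 a := (lexLe_total m0 a).resolve_right (hcond.mp hc)
        exact lexLe_trans hma hle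
      · intro y hy
        rcases List.mem_cons.mp hy with h | h
        · exact h ▸ hle
        · exact hall y h
    · obtain ⟨r, hr, hmem, hle, hall⟩ := ih m0
      refine ⟨r, ?_, ?_, ?_, ?_⟩
      · rw [List.foldl_cons]
        have : List.foldl (fun acc x =>
        match acc with
        | none => some x
        | some m => if (decide (m.1 < x.1) || (!decide (x.1 < m.1) && decide (m.2 < x.2))) = true then some x else some m)
            (some m0) t = some r := hr
        rw [← this]
        congr 1
        exact if_neg hc
      · rcases hmem with h | h
        · exact Or.inl h
        · exact Or.inr (by simp [h])
      · exact hle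
      · intro y hy
        rcases List.mem_cons.mp hy with h | h
        · subst h
          have hma : lexLe y m0 := by
            by_contra hno
            exact hc (hcond.mpr hno)
          exact lexLe_trans hma hle
        · exact hall y h

theorem min2_spec (xs : List (Int × Int)) (h : xs ≠ []) :
    ∃ r, PySem.List.min2? xs Prod.fst Prod.snd = some r ∧ r ∈ xs ∧ ∀ y ∈ xs, lexLe r y := by
  obtain ⟨x, t, rfl⟩ := List.exists_cons_of_ne_nil h
  obtain ⟨r, hr, hmem, hle, hall⟩ := minFoldAux t x
  refine ⟨r, ?_, ?_, ?_⟩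
  · unfold PySem.List.min2?
    rw [List.foldl_cons, ← hr]
    congr 1
    funext acc y
    cases acc <;> rfl
  · rcases hmem with h | h
    · simp [h]
    · simp [h]
  · intro y hy
    rcases List.mem_cons.mp hy with h | h
    · exact h ▸ hle
    · exact hall y h

theorem max2_spec (xs : List (Int × Int)) (h : xs ≠ []) :
    ∃ r, PySem.List.max2? xs Prod.fst Prod.snd = some r ∧ r ∈ xs ∧ ∀ y ∈ xs, lexLe y r := by
  obtain ⟨x, t, rfl⟩ := List.exists_cons_of_ne_nil h
  obtain ⟨r, hr, hmem, hle, hall⟩ := maxFoldAux t x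
  refine ⟨r, ?_, ?_, ?_⟩
  · unfold PySem.List.max2?
    rw [List.foldl_cons, ← hr]
    congr 1
    funext acc y
    cases acc <;> rfl
  · rcases hmem with h | h
    · simp [h]
    · simp [h]
  · intro y hy
    rcases List.mem_cons.mp hy with h | h
    · exact h ▸ hle
    · exact hall y h

-- ----- remove? and permutations -----

theorem remove?_perm (xs : List (Int × Int)) (v : Int × Int) (h : v ∈ xs) :
    ∃ ys, PySem.List.remove? xs v = some ys ∧ xs.Perm (v :: ys) := by
  induction xs with
  | nil => simp at h
  | cons x t ih =>
    by_cases hx : x = v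
    · subst hx
      exact ⟨t, PySem.List.remove?_cons_self x t, List.Perm.refl _⟩
    · have hvt : v ∈ t := by
        rcases List.mem_cons.mp h with h' | h'
        · exact absurd h'.symm hx
        · exact h'
      obtain ⟨ys, hys, hperm⟩ := ih hvt
      refine ⟨x :: ys, ?_, ?_⟩
      · rw [PySem.List.remove?_cons_of_ne t hx, hys]; rfl
      · exact (hperm.cons x).trans (List.Perm.swap v x ys)

-- ----- spec multisets -----

def onSpec (ret time : List Int) (c : Int) : List (Int × Int) :=
  ((List.range ret.length).filter (fun i => ret.getD i 0 == 1)).map (fun i => (time.getD i 0 - c, (i : Int)))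

def offSpec (ret time : List Int) : List (Int × Int) :=
  ((List.range ret.length).filter (fun i => ret.getD i 0 == 0)).map (fun i => (time.getD i 0, (i : Int)))

theorem mem_onSpec {ret time : List Int} {c : Int} {x : Int × Int} :
    x ∈ onSpec ret time c ↔ ∃ i : Nat, i < ret.length ∧ ret.getD i 0 = 1 ∧ x = (time.getD i 0 - c, (i : Int)) := by
  simp [onSpec, List.mem_filter, List.mem_range]
  constructor
  · rintro ⟨i, ⟨hi, hr⟩, hx⟩; exact ⟨i, hi, hr, hx.symm⟩
  · rintro ⟨i, hi, hr, hx⟩; exact ⟨i, ⟨hi, hr⟩, hx.symm⟩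

theorem mem_offSpec {ret time : List Int} {x : Int × Int} :
    x ∈ offSpec ret time ↔ ∃ i : Nat, i < ret.length ∧ ret.getD i 0 = 0 ∧ x = (time.getD i 0, (i : Int)) := by
  simp [offSpec, List.mem_filter, List.mem_range]
  constructor
  · rintro ⟨i, ⟨hi, hr⟩, hx⟩; exact ⟨i, hi, hr, hx.symm⟩
  · rintro ⟨i, hi, hr, hx⟩; exact ⟨i, ⟨hi, hr⟩, hx.symm⟩

theorem nodup_pairs {g : Nat → Int} {l : List Nat} (hl : l.Nodup) :
    (l.map (fun i => (g i, (i : Int)))).Nodup := by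
  refine hl.map ?_
  intro i j hij
  have := (Prod.mk.injEq _ _ _ _).mp hij
  exact_mod_cast this.2

theorem nodup_onSpec (ret time : List Int) (c : Int) : (onSpec ret time c).Nodup :=
  nodup_pairs ((List.nodup_range).filter _)

theorem nodup_offSpec (ret time : List Int) : (offSpec ret time).Nodup :=
  nodup_pairs ((List.nodup_range).filter _)

-- ----- the time-increment fold -----

theorem incFold_spec (ret : List Int) : ∀ (k : Nat) (time : List Int), k ≤ time.length →
    ((List.range k).foldl
        (fun (t : List Int) (i : Nat) => PySem.List.pySetD t (i : Int) (PySem.List.pyGetD t (i : Int) 0 + PySem.List.pyGetD ret (i : Int) 0)) time).length = time.length ∧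
    ∀ j : Nat, ((List.range k).foldl
        (fun (t : List Int) (i : Nat) => PySem.List.pySetD t (i : Int) (PySem.List.pyGetD t (i : Int) 0 + PySem.List.pyGetD ret (i : Int) 0)) time).getD j 0 =
      if j < k then time.getD j 0 + ret.getD j 0 else time.getD j 0 := by
  intro k
  induction k with
  | zero => intro time _; simp
  | succ k ih =>
    intro time hk
    obtain ⟨ihlen, ihget⟩ := ih time (by omega)
    rw [List.range_succ, List.foldl_append]
    simp only [List.foldl_cons, List.foldl_nil]
    set u := (List.range k).foldl
        (fun (t : List Int) (i : Nat) => PySem.List.pySetD t (i : Int) (PySem.List.pyGetD t (i : Int) 0 + PySem.List.pyGetD ret (i : Int) 0)) time with hu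
    have hklen : k < u.length := by omega
    rw [PySem.List.pySetD_natCast, PySem.List.pyGetD_natCast, PySem.List.pyGetD_natCast]
    constructor
    · rw [List.length_set]; exact ihlen
    · intro j
      by_cases hjk : j = k
      · subst hjk
        rw [List.getD_eq_getElem?_getD, List.getElem?_set_self (by omega), Option.getD_some]
        rw [ihget j]
        simp
      · rw [List.getD_eq_getElem?_getD, List.getElem?_set_ne (by omega), ← List.getD_eq_getElem?_getD]
        rw [ihget j]
        by_cases hj : j < k
        · simp [hj, show j < k + 1 by omega]
        · simp [hj, show ¬ j < k + 1 by omega]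

-- ----- the selection scan -----

-- invariant of A's out/in scan after the first k indices
def OutInv (t1 ret : List Int) (k : Nat) (o : Int) : Prop :=
  (o = -1 ∧ ∀ i : Nat, i < k → ret.getD i 0 ≠ 1) ∨
  (∃ j : Nat, j < k ∧ o = (j : Int) ∧ ret.getD j 0 = 1 ∧
    ∀ i : Nat, i < k → ret.getD i 0 = 1 → lexLe (t1.getD i 0, (i : Int)) (t1.getD j 0, (j : Int)))

def InInv (t1 ret : List Int) (k : Nat) (v : Int) : Prop :=
  (v = -1 ∧ ∀ i : Nat, i < k → ret.getD i 0 = 1) ∨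
  (∃ j : Nat, j < k ∧ v = (j : Int) ∧ ret.getD j 0 ≠ 1 ∧
    ∀ i : Nat, i < k → ret.getD i 0 ≠ 1 → lexLe (t1.getD j 0, (j : Int)) (t1.getD i 0, (i : Int)))

theorem scanFold_inv (t1 ret : List Int) (N : Nat)
    (hvals : ∀ i : Nat, i < N → ret.getD i 0 = 0 ∨ ret.getD i 0 = 1) :
    ∀ k, k ≤ N →
      OutInv t1 ret k ((List.range k).foldl
        (fun (s : Int × Int) (i : Nat) =>
          if PySem.List.pyGetD ret (i : Int) 0 ≠ 0 then
            if s.1 = -1 then ((i : Int), s.2)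
            else (if lexLtB (PySem.List.pyGetD t1 s.1 0, s.1) (PySem.List.pyGetD t1 (i : Int) 0, (i : Int)) then (i : Int) else s.1, s.2)
          else
            if s.2 = -1 then (s.1, (i : Int))
            else (s.1, if lexLtB (PySem.List.pyGetD t1 (i : Int) 0, (i : Int)) (PySem.List.pyGetD t1 s.2 0, s.2) then (i : Int) else s.2))
        (-1, -1)).1 ∧
      InInv t1 ret k ((List.range k).foldl
        (fun (s : Int × Int) (i : Nat) =>
          if PySem.List.pyGetD ret (i : Int) 0 ≠ 0 then
            if s.1 = -1 then ((i : Int), s.2)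
            else (if lexLtB (PySem.List.pyGetD t1 s.1 0, s.1) (PySem.List.pyGetD t1 (i : Int) 0, (i : Int)) then (i : Int) else s.1, s.2)
          else
            if s.2 = -1 then (s.1, (i : Int))
            else (s.1, if lexLtB (PySem.List.pyGetD t1 (i : Int) 0, (i : Int)) (PySem.List.pyGetD t1 s.2 0, s.2) then (i : Int) else s.2))
        (-1, -1)).2 := by
  intro k
  induction k with
  | zero =>
    intro _
    constructor
    · exact Or.inl ⟨rfl, by omega⟩
    · exact Or.inl ⟨rfl, by omega⟩
  | succ k ih =>
    intro hk
    obtain ⟨ho, hv⟩ := ih (by omega)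
    rw [List.range_succ, List.foldl_append]
    simp only [List.foldl_cons, List.foldl_nil]
    set s := ((List.range k).foldl
        (fun (s : Int × Int) (i : Nat) =>
          if PySem.List.pyGetD ret (i : Int) 0 ≠ 0 then
            if s.1 = -1 then ((i : Int), s.2)
            else (if lexLtB (PySem.List.pyGetD t1 s.1 0, s.1) (PySem.List.pyGetD t1 (i : Int) 0, (i : Int)) then (i : Int) else s.1, s.2)
          else
            if s.2 = -1 then (s.1, (i : Int))
            else (s.1, if lexLtB (PySem.List.pyGetD t1 (i : Int) 0, (i : Int)) (PySem.List.pyGetD t1 s.2 0, s.2) then (i : Int) else s.2))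
        (-1, -1)) with hs
    rw [PySem.List.pyGetD_natCast]
    by_cases hrk : ret.getD k 0 = 1
    · -- on-court index k: the out component is updated, the in component kept
      have hne : ret.getD k 0 ≠ 0 := by omega
      simp only [hne, if_true, ne_eq, not_false_iff, if_pos]
      rcases ho with ⟨h1, h2⟩ | ⟨j, hjk, hoj, hrj, hdom⟩
      · -- no on-court seen yet
        rw [h1]
        simp only [if_pos rfl]
        constructor
        · refine Or.inr ⟨k, by omega, rfl, hrk, ?_⟩
          intro i hi hri
          have : i = k := by
            by_contra hne'
            exact h2 i (by omega) hri
          subst this; exact lexLe_refl _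
        · -- in component unchanged
          rcases hv with ⟨g1, g2⟩ | ⟨j, hjk, hvj, hrj, hdom⟩
          · exact Or.inl ⟨g1, fun i hi => by
              by_cases hik : i = k
              · subst hik; exact hrk
              · exact g2 i (by omega)⟩
          · exact Or.inr ⟨j, by omega, hvj, hrj, fun i hi hri => by
              by_cases hik : i = k
              · subst hik; exact absurd hrk hri
              · exact hdom i (by omega) hri⟩
      · -- current best j
        have hojne : ¬ ((j : Int) = -1) := by omega
        rw [hoj]
        simp only [hojne, if_false, PySem.List.pyGetD_natCast]
        constructor
        · by_cases hlt : lexLtB (t1.getD j 0, (j : Int)) (t1.getD k 0, (k : Int)) = true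
          · simp only [hlt, if_true]
            refine Or.inr ⟨k, by omega, rfl, hrk, ?_⟩
            intro i hi hri
            have hjle : lexLe (t1.getD j 0, (j : Int)) (t1.getD k 0, (k : Int)) :=
              (lexLe_total _ _).resolve_right ((lexLtB_iff _ _).mp hlt)
            by_cases hik : i = k
            · subst hik; exact lexLe_refl _
            · exact lexLe_trans (hdom i (by omega) hri) hjle
          · simp only [hlt, if_false]
            refine Or.inr ⟨j, by omega, rfl, hrj, ?_⟩
            intro i hi hri
            by_cases hik : i = k
            · subst hik
              have : lexLe (t1.getD i 0, (i : Int)) (t1.getD j 0, (j : Int)) := by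
                by_contra hno
                exact hlt ((lexLtB_iff _ _).mpr hno)
              exact this
            · exact hdom i (by omega) hri
        · rcases hv with ⟨g1, g2⟩ | ⟨j', hjk', hvj, hrj', hdom'⟩
          · exact Or.inl ⟨g1, fun i hi => by
              by_cases hik : i = k
              · subst hik; exact hrk
              · exact g2 i (by omega)⟩
          · exact Or.inr ⟨j', by omega, hvj, hrj', fun i hi hri => by
              by_cases hik : i = k
              · subst hik; exact absurd hrk hri
              · exact hdom' i (by omega) hri⟩
    · -- off-court index k
      have h0 : ret.getD k 0 = 0 := by
        rcases hvals k (by omega) with h | h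
        · exact h
        · exact absurd h hrk
      rw [if_neg (show ¬ (ret.getD k 0 ≠ 0) by omega)]
      rcases hv with ⟨g1, g2⟩ | ⟨j, hjk, hvj, hrj, hdom⟩
      · rw [g1]
        simp only [if_pos rfl]
        constructor
        · rcases ho with ⟨h1, h2⟩ | ⟨j, hjk, hoj, hrj, hdom⟩
          · exact Or.inl ⟨h1, fun i hi => by
              by_cases hik : i = k
              · subst hik; omega
              · exact h2 i (by omega)⟩
          · exact Or.inr ⟨j, by omega, hoj, hrj, fun i hi hri => by
              by_cases hik : i = k
              · subst hik; omega
              · exact hdom i (by omega) hri⟩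
        · refine Or.inr ⟨k, by omega, rfl, by omega, ?_⟩
          intro i hi hri
          have : i = k := by
            by_contra hne'
            have := g2 i (by omega)
            exact hri this
          subst this; exact lexLe_refl _
      · have hvjne : ¬ ((j : Int) = -1) := by omega
        rw [hvj]
        simp only [hvjne, if_false, PySem.List.pyGetD_natCast]
        constructor
        · rcases ho with ⟨h1, h2⟩ | ⟨j', hjk', hoj, hrj', hdom'⟩
          · exact Or.inl ⟨h1, fun i hi => by
              by_cases hik : i = k
              · subst hik; omega
              · exact h2 i (by omega)⟩
          · exact Or.inr ⟨j', by omega, hoj, hrj', fun i hi hri => by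
              by_cases hik : i = k
              · subst hik; omega
              · exact hdom' i (by omega) hri⟩
        · by_cases hlt : lexLtB (t1.getD k 0, (k : Int)) (t1.getD j 0, (j : Int)) = true
          · simp only [hlt, if_true]
            refine Or.inr ⟨k, by omega, rfl, by omega, ?_⟩
            intro i hi hri
            have hkle : lexLe (t1.getD k 0, (k : Int)) (t1.getD j 0, (j : Int)) :=
              (lexLe_total _ _).resolve_right ((lexLtB_iff _ _).mp hlt)
            by_cases hik : i = k
            · subst hik; exact lexLe_refl _
            · exact lexLe_trans hkle (hdom i (by omega) hri)
          · simp only [hlt, if_false]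
            refine Or.inr ⟨j, by omega, rfl, hrj, ?_⟩
            intro i hi hri
            by_cases hik : i = k
            · subst hik
              have : lexLe (t1.getD j 0, (j : Int)) (t1.getD i 0, (i : Int)) := by
                by_contra hno
                exact hlt ((lexLtB_iff _ _).mpr hno)
              exact this
            · exact hdom i (by omega) hri

theorem lexLe_mk (x1 x2 y1 y2 : Int) :
    lexLe (x1, x2) (y1, y2) ↔ (x1 < y1 ∨ (x1 = y1 ∧ x2 ≤ y2)) := by
  simp [lexLe]

theorem incLoop_spec (ret time : List Int) (N : Nat) (h : N ≤ time.length) :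
    (incLoop ret time (N : Int)).length = time.length ∧
    ∀ j : Nat, (incLoop ret time (N : Int)).getD j 0 =
      if j < N then time.getD j 0 + ret.getD j 0 else time.getD j 0 := by
  have hb : incLoop ret time (N : Int) =
      (List.range N).foldl
        (fun (t : List Int) (i : Nat) => PySem.List.pySetD t (i : Int) (PySem.List.pyGetD t (i : Int) 0 + PySem.List.pyGetD ret (i : Int) 0)) time := by
    unfold incLoop
    rw [PySem.List.pyRange_zero_natCast, List.foldl_map]
  rw [hb]
  exact incFold_spec ret N time h

theorem scanLoop_spec (t1 ret : List Int) (N : Nat)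
    (hvals : ∀ i : Nat, i < N → ret.getD i 0 = 0 ∨ ret.getD i 0 = 1)
    (h1 : ∃ i : Nat, i < N ∧ ret.getD i 0 = 1)
    (h0 : ∃ i : Nat, i < N ∧ ret.getD i 0 = 0) :
    ∃ o inn : Nat, scanLoop ret t1 (N : Int) = ((o : Int), (inn : Int)) ∧
      o < N ∧ inn < N ∧ ret.getD o 0 = 1 ∧ ret.getD inn 0 = 0 ∧
      (∀ i : Nat, i < N → ret.getD i 0 = 1 → lexLe (t1.getD i 0, (i : Int)) (t1.getD o 0, (o : Int))) ∧
      (∀ i : Nat, i < N → ret.getD i 0 = 0 → lexLe (t1.getD inn 0, (inn : Int)) (t1.getD i 0, (i : Int))) := by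
  have hb : scanLoop ret t1 (N : Int) =
      (List.range N).foldl
        (fun (s : Int × Int) (i : Nat) =>
          if PySem.List.pyGetD ret (i : Int) 0 ≠ 0 then
            if s.1 = -1 then ((i : Int), s.2)
            else (if lexLtB (PySem.List.pyGetD t1 s.1 0, s.1) (PySem.List.pyGetD t1 (i : Int) 0, (i : Int)) then (i : Int) else s.1, s.2)
          else
            if s.2 = -1 then (s.1, (i : Int))
            else (s.1, if lexLtB (PySem.List.pyGetD t1 (i : Int) 0, (i : Int)) (PySem.List.pyGetD t1 s.2 0, s.2) then (i : Int) else s.2))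
        (-1, -1) := by
    unfold scanLoop
    rw [PySem.List.pyRange_zero_natCast, List.foldl_map]
  obtain ⟨ho, hv⟩ := scanFold_inv t1 ret N hvals N le_rfl
  rcases ho with ⟨hsent, hnone⟩ | ⟨o, hoN, hoeq, hro, hodom⟩
  · obtain ⟨i, hiN, hri⟩ := h1
    exact absurd hri (hnone i hiN)
  · rcases hv with ⟨hsent2, hall1⟩ | ⟨inn, hinnN, hinneq, hrinn, hinndom⟩
    · obtain ⟨i, hiN, hri⟩ := h0
      have := hall1 i hiN
      omega
    · have hrinn0 : ret.getD inn 0 = 0 := by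
        rcases hvals inn hinnN with h' | h'
        · exact h'
        · exact absurd h' hrinn
      refine ⟨o, inn, ?_, hoN, hinnN, hro, hrinn0, hodom, fun i hi hri => hinndom i hi (by omega)⟩
      rw [hb, ← hoeq, ← hinneq]

-- ----- the global invariant -----

def LoopInv (N P : Nat) (c : Int) (ret time : List Int) (on off : List (Int × Int)) : Prop :=
  ret.length = N ∧ time.length = N ∧
  (∀ i : Nat, i < N → ret.getD i 0 = 0 ∨ ret.getD i 0 = 1) ∧
  on.Perm (onSpec ret time c) ∧ off.Perm (offSpec ret time) ∧
  on.length = P ∧ off.length = N - P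

theorem step_inv (N P : Nat) (hP0 : 0 < P) (hPN : P < N) (c : Int)
    (ret time : List Int) (on off : List (Int × Int))
    (h : LoopInv N P c ret time on off) :
    LoopInv N P (c + 1) (stepA ret time (N : Int)).1 (stepA ret time (N : Int)).2
      (stepB on off (c + 1)).1 (stepB on off (c + 1)).2 := by
  obtain ⟨hlr, hltm, hvals, hon, hoff, hlon, hloff⟩ := h
  have hoffne : off ≠ [] := by
    intro hnil
    rw [hnil] at hloff
    simp at hloff
    omega
  have honne : on ≠ [] := by
    intro hnil
    rw [hnil] at hlon
    simp at hlon
    omega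
  obtain ⟨tin, hmin, htinmem, htinmin⟩ := min2_spec off hoffne
  obtain ⟨tout, hmax, htoutmem, htoutmax⟩ := max2_spec on honne
  obtain ⟨yson, hremon, hpon⟩ := remove?_perm on tout htoutmem
  obtain ⟨ysoff, hremoff, hpoff⟩ := remove?_perm off tin htinmem
  have hB : stepB on off (c + 1) =
      (yson ++ [(tin.1 - (c + 1), tin.2)], ysoff ++ [(tout.1 + (c + 1), tout.2)]) := by
    have hB1 : stepB on off (c + 1) =
        ((PySem.List.remove? on tout).getD on ++ [(tin.1 - (c + 1), tin.2)],
         (PySem.List.remove? off tin).getD off ++ [(tout.1 + (c + 1), tout.2)]) := by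
      unfold stepB
      rw [hmin, hmax]
    rw [hB1, hremon, hremoff]
    rfl
  obtain ⟨ht1len, ht1get⟩ := incLoop_spec ret time N (le_of_eq hltm.symm)
  have h1 : ∃ i : Nat, i < N ∧ ret.getD i 0 = 1 := by
    obtain ⟨x, hx⟩ := List.exists_mem_of_ne_nil _ honne
    obtain ⟨i, hi, hri, _⟩ := mem_onSpec.mp ((List.Perm.mem_iff hon).mp hx)
    exact ⟨i, by omega, hri⟩
  have h0 : ∃ i : Nat, i < N ∧ ret.getD i 0 = 0 := by
    obtain ⟨x, hx⟩ := List.exists_mem_of_ne_nil _ hoffne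
    obtain ⟨i, hi, hri, _⟩ := mem_offSpec.mp ((List.Perm.mem_iff hoff).mp hx)
    exact ⟨i, by omega, hri⟩
  obtain ⟨o, inn, hsc, hoN, hinnN, hro, hrinn, hodom, hinndom⟩ :=
    scanLoop_spec (incLoop ret time (N : Int)) ret N hvals h1 h0
  have hA : stepA ret time (N : Int) =
      ((ret.set o 0).set inn 1, incLoop ret time (N : Int)) := by
    simp only [stepA]
    rw [hsc]
    simp [PySem.List.pySetD_natCast]
  set t1 := incLoop ret time (N : Int) with ht1def
  have ht1at : ∀ j : Nat, j < N → t1.getD j 0 = time.getD j 0 + ret.getD j 0 := by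
    intro j hj
    rw [ht1get j]
    simp [hj]
  obtain ⟨j0, hj0, hrj0, htoutpair⟩ := mem_onSpec.mp ((List.Perm.mem_iff hon).mp htoutmem)
  obtain ⟨i0, hi0, hri0, htinpair⟩ := mem_offSpec.mp ((List.Perm.mem_iff hoff).mp htinmem)
  have htout_o : tout = (time.getD o 0 - c, (o : Int)) := by
    have hmem : ((time.getD o 0 - c : Int), (o : Int)) ∈ on :=
      (List.Perm.mem_iff hon).mpr (mem_onSpec.mpr ⟨o, by omega, hro, rfl⟩)
    have h2 := htoutmax _ hmem
    have hd := hodom j0 (by omega) hrj0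
    have e1 : t1.getD j0 0 = time.getD j0 0 + 1 := by rw [ht1at j0 (by omega), hrj0]
    have e2 : t1.getD o 0 = time.getD o 0 + 1 := by rw [ht1at o hoN, hro]
    rw [e1, e2] at hd
    rw [htoutpair] at h2 ⊢
    have hd' : lexLe (time.getD j0 0 - c, (j0 : Int)) (time.getD o 0 - c, (o : Int)) := by
      rw [lexLe_mk] at hd ⊢
      omega
    exact lexLe_antisymm hd' h2
  have htin_inn : tin = (time.getD inn 0, (inn : Int)) := by
    have hmem : ((time.getD inn 0 : Int), (inn : Int)) ∈ off :=
      (List.Perm.mem_iff hoff).mpr (mem_offSpec.mpr ⟨inn, by omega, hrinn, rfl⟩)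
    have h2 := htinmin _ hmem
    have hd := hinndom i0 (by omega) hri0
    have e1 : t1.getD inn 0 = time.getD inn 0 := by rw [ht1at inn hinnN, hrinn, add_zero]
    have e2 : t1.getD i0 0 = time.getD i0 0 := by rw [ht1at i0 (by omega), hri0, add_zero]
    rw [e1, e2] at hd
    rw [htinpair] at h2 ⊢
    exact lexLe_antisymm h2 hd
  have honinn : o ≠ inn := by
    intro hh
    rw [hh] at hro
    omega
  rw [hA, hB]
  set retN := (ret.set o 0).set inn 1 with hretNdef
  have hretNlen : retN.length = N := by simp [hretNdef, hlr]
  have hretNat : ∀ j : Nat, retN.getD j 0 = if j = inn then 1 else if j = o then 0 else ret.getD j 0 := by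
    intro j
    by_cases hji : j = inn
    · subst hji
      rw [hretNdef, List.getD_eq_getElem?_getD, List.getElem?_set_self (by simp [hlr]; omega), Option.getD_some]
      simp
    · rw [hretNdef, List.getD_eq_getElem?_getD, List.getElem?_set_ne (by omega), ← List.getD_eq_getElem?_getD]
      by_cases hjo : j = o
      · subst hjo
        rw [List.getD_eq_getElem?_getD, List.getElem?_set_self (by omega), Option.getD_some]
        simp [hji]
      · rw [List.getD_eq_getElem?_getD, List.getElem?_set_ne (by omega), ← List.getD_eq_getElem?_getD]
        simp [hji, hjo]
  have hvalsN : ∀ i : Nat, i < N → retN.getD i 0 = 0 ∨ retN.getD i 0 = 1 := by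
    intro i hi
    rw [hretNat i]
    by_cases h1' : i = inn
    · simp [h1']
    · by_cases h2' : i = o
      · rw [if_neg h1', if_pos h2']
        left
        rfl
      · simp only [if_neg h1', if_neg h2']
        exact hvals i hi
  have honnd : on.Nodup := (List.Perm.nodup_iff hon).mpr (nodup_onSpec ret time c)
  have hoffnd : off.Nodup := (List.Perm.nodup_iff hoff).mpr (nodup_offSpec ret time)
  obtain ⟨htoutnot, hysonnd⟩ := List.nodup_cons.mp ((List.Perm.nodup_iff hpon).mp honnd)
  obtain ⟨htinnot, hysoffnd⟩ := List.nodup_cons.mp ((List.Perm.nodup_iff hpoff).mp hoffnd)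
  have hysonmem : ∀ a : Int × Int, a ∈ yson ↔ (a ∈ onSpec ret time c ∧ a ≠ tout) := by
    intro a
    constructor
    · intro ha
      refine ⟨(List.Perm.mem_iff hon).mp ((List.Perm.mem_iff hpon).mpr (List.mem_cons_of_mem _ ha)), ?_⟩
      rintro rfl
      exact htoutnot ha
    · rintro ⟨hspec, hne⟩
      have hmem : a ∈ tout :: yson := (List.Perm.mem_iff hpon).mp ((List.Perm.mem_iff hon).mpr hspec)
      rcases List.mem_cons.mp hmem with h' | h'
      · exact absurd h' hne
      · exact h'
  have hysoffmem : ∀ a : Int × Int, a ∈ ysoff ↔ (a ∈ offSpec ret time ∧ a ≠ tin) := by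
    intro a
    constructor
    · intro ha
      refine ⟨(List.Perm.mem_iff hoff).mp ((List.Perm.mem_iff hpoff).mpr (List.mem_cons_of_mem _ ha)), ?_⟩
      rintro rfl
      exact htinnot ha
    · rintro ⟨hspec, hne⟩
      have hmem : a ∈ tin :: ysoff := (List.Perm.mem_iff hpoff).mp ((List.Perm.mem_iff hoff).mpr hspec)
      rcases List.mem_cons.mp hmem with h' | h'
      · exact absurd h' hne
      · exact h'
  unfold LoopInv
  refine ⟨hretNlen, by rw [ht1len]; exact hltm, hvalsN, ?_, ?_, ?_, ?_⟩
  · -- on-court permutation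
    show (yson ++ [(tin.1 - (c + 1), tin.2)]).Perm (onSpec retN t1 (c + 1))
    have hnp_not : (tin.1 - (c + 1), tin.2) ∉ yson := by
      intro hmem
      obtain ⟨hspec, _⟩ := (hysonmem _).mp hmem
      obtain ⟨i, hiN, hri, hpair⟩ := mem_onSpec.mp hspec
      rw [htin_inn] at hpair
      simp only [Prod.mk.injEq] at hpair
      have hii : i = inn := by omega
      rw [hii] at hri
      omega
    have hnodLHS : (yson ++ [(tin.1 - (c + 1), tin.2)]).Nodup := by
      refine List.Nodup.append hysonnd (List.nodup_singleton _) ?_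
      intro x hx hx'
      simp only [List.mem_singleton] at hx'
      subst hx'
      exact hnp_not hx
    rw [List.perm_ext_iff_of_nodup hnodLHS (nodup_onSpec retN t1 (c + 1))]
    intro a
    constructor
    · intro ha
      rcases List.mem_append.mp ha with ha' | ha'
      · obtain ⟨hspec, hne⟩ := (hysonmem a).mp ha'
        obtain ⟨i, hiN, hri, hpair⟩ := mem_onSpec.mp hspec
        have hio : i ≠ o := by
          rintro rfl
          exact hne (by rw [hpair, htout_o])
        have hiinn : i ≠ inn := by
          rintro rfl
          omega
        refine mem_onSpec.mpr ⟨i, by omega, ?_, ?_⟩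
        · rw [hretNat i, if_neg hiinn, if_neg hio]
          exact hri
        · rw [hpair]
          have heq : t1.getD i 0 - (c + 1) = time.getD i 0 - c := by
            rw [ht1at i (by omega), hri]
            ring
          rw [heq]
      · have ha'' : a = (tin.1 - (c + 1), tin.2) := by simpa using ha'
        refine mem_onSpec.mpr ⟨inn, by omega, ?_, ?_⟩
        · rw [hretNat inn]
          simp
        · rw [ha'', htin_inn]
          have heq : t1.getD inn 0 - (c + 1) = time.getD inn 0 - (c + 1) := by
            rw [ht1at inn hinnN, hrinn]
            ring
          rw [heq]
    · intro ha
      obtain ⟨i, hiN', hri', hpair⟩ := mem_onSpec.mp ha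
      have hiN : i < N := by
        rw [hretNlen] at hiN'
        exact hiN'
      rw [hretNat i] at hri'
      by_cases hinn' : i = inn
      · subst hinn'
        apply List.mem_append.mpr
        right
        simp only [List.mem_singleton]
        rw [hpair, htin_inn]
        have heq : t1.getD i 0 - (c + 1) = time.getD i 0 - (c + 1) := by
          rw [ht1at i hiN, hrinn]
          ring
        rw [heq]
      · by_cases ho' : i = o
        · rw [if_neg hinn', if_pos ho'] at hri'
          omega
        · rw [if_neg hinn', if_neg ho'] at hri'
          apply List.mem_append.mpr
          left
          apply (hysonmem a).mpr
          have heq : t1.getD i 0 - (c + 1) = time.getD i 0 - c := by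
            rw [ht1at i hiN, hri']
            ring
          refine ⟨mem_onSpec.mpr ⟨i, by omega, hri', by rw [hpair, heq]⟩, ?_⟩
          rw [hpair, htout_o]
          intro hEq
          simp only [Prod.mk.injEq] at hEq
          omega
  · -- off-court permutation
    show (ysoff ++ [(tout.1 + (c + 1), tout.2)]).Perm (offSpec retN t1)
    have hmp_not : (tout.1 + (c + 1), tout.2) ∉ ysoff := by
      intro hmem
      obtain ⟨hspec, _⟩ := (hysoffmem _).mp hmem
      obtain ⟨i, hiN, hri, hpair⟩ := mem_offSpec.mp hspec
      rw [htout_o] at hpair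
      simp only [Prod.mk.injEq] at hpair
      have hio : i = o := by omega
      rw [hio] at hri
      omega
    have hnodLHS : (ysoff ++ [(tout.1 + (c + 1), tout.2)]).Nodup := by
      refine List.Nodup.append hysoffnd (List.nodup_singleton _) ?_
      intro x hx hx'
      simp only [List.mem_singleton] at hx'
      subst hx'
      exact hmp_not hx
    rw [List.perm_ext_iff_of_nodup hnodLHS (nodup_offSpec retN t1)]
    intro a
    constructor
    · intro ha
      rcases List.mem_append.mp ha with ha' | ha'
      · obtain ⟨hspec, hne⟩ := (hysoffmem a).mp ha'
        obtain ⟨i, hiN, hri, hpair⟩ := mem_offSpec.mp hspec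
        have hiinn : i ≠ inn := by
          rintro rfl
          exact hne (by rw [hpair, htin_inn])
        have hio : i ≠ o := by
          rintro rfl
          omega
        refine mem_offSpec.mpr ⟨i, by omega, ?_, ?_⟩
        · rw [hretNat i, if_neg hiinn, if_neg hio]
          exact hri
        · rw [hpair]
          have heq : t1.getD i 0 = time.getD i 0 := by
            rw [ht1at i (by omega), hri, add_zero]
          rw [heq]
      · have ha'' : a = (tout.1 + (c + 1), tout.2) := by simpa using ha'
        refine mem_offSpec.mpr ⟨o, by omega, ?_, ?_⟩
        · rw [hretNat o, if_neg (by omega : o ≠ inn)]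
          simp
        · rw [ha'', htout_o]
          have heq : t1.getD o 0 = time.getD o 0 - c + (c + 1) := by
            rw [ht1at o hoN, hro]
            ring
          rw [heq]
    · intro ha
      obtain ⟨i, hiN', hri', hpair⟩ := mem_offSpec.mp ha
      have hiN : i < N := by
        rw [hretNlen] at hiN'
        exact hiN'
      rw [hretNat i] at hri'
      by_cases hinn' : i = inn
      · rw [if_pos hinn'] at hri'
        omega
      · by_cases ho' : i = o
        · subst ho'
          apply List.mem_append.mpr
          right
          simp only [List.mem_singleton]
          rw [hpair, htout_o]
          have heq : t1.getD i 0 = time.getD i 0 - c + (c + 1) := by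
            rw [ht1at i hiN, hro]
            ring
          rw [heq]
        · rw [if_neg hinn', if_neg ho'] at hri'
          apply List.mem_append.mpr
          left
          apply (hysoffmem a).mpr
          have heq : t1.getD i 0 = time.getD i 0 := by
            rw [ht1at i hiN, hri', add_zero]
          refine ⟨mem_offSpec.mpr ⟨i, by omega, hri', by rw [hpair, heq]⟩, ?_⟩
          rw [hpair, htin_inn]
          intro hEq
          simp only [Prod.mk.injEq] at hEq
          omega
  · -- on-court length
    have hl := hpon.length_eq
    simp only [List.length_cons] at hl
    simp only [List.length_append, List.length_cons, List.length_nil]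
    omega
  · -- off-court length
    have hl := hpoff.length_eq
    simp only [List.length_cons] at hl
    simp only [List.length_append, List.length_cons, List.length_nil]
    omega

-- ----- wiring -----

theorem outFold (arr ret : List Int) : ∀ (l : List Nat) (acc : List Int),
    l.foldl (fun acc (i : Nat) => if PySem.List.pyGetD ret (i : Int) 0 ≠ 0 then acc ++ [PySem.List.pyGetD arr (i : Int) 0] else acc) acc
      = acc ++ (l.filter (fun i => decide (ret.getD i 0 ≠ 0))).map (fun (i : Nat) => PySem.List.pyGetD arr (i : Int) 0) := by
  intro l
  induction l with
  | nil => intro acc; simp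
  | cons x t ih =>
    intro acc
    rw [List.foldl_cons]
    by_cases hx : PySem.List.pyGetD ret (x : Int) 0 ≠ 0
    · rw [if_pos hx, ih]
      have hd : decide (ret.getD x 0 ≠ 0) = true := by
        rw [PySem.List.pyGetD_natCast] at hx
        simpa using hx
      have hfil : List.filter (fun i => decide (ret.getD i 0 ≠ 0)) (x :: t)
          = x :: List.filter (fun i => decide (ret.getD i 0 ≠ 0)) t := by
        have hcond : ¬ ret[x]?.getD 0 = 0 := by
          rw [PySem.List.pyGetD_natCast, List.getD_eq_getElem?_getD] at hx
          exact hx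
        rw [List.filter_cons]
        simp [hcond]
      rw [hfil, List.map_cons]
      simp [List.append_assoc]
    · rw [if_neg hx, ih]
      have hd : decide (ret.getD x 0 ≠ 0) = false := by
        rw [PySem.List.pyGetD_natCast] at hx
        simpa using hx
      have hfil : List.filter (fun i => decide (ret.getD i 0 ≠ 0)) (x :: t)
          = List.filter (fun i => decide (ret.getD i 0 ≠ 0)) t := by
        have hcond : ret[x]?.getD 0 = 0 := by
          rw [PySem.List.pyGetD_natCast, List.getD_eq_getElem?_getD] at hx
          omega
        rw [List.filter_cons]
        simp [hcond]
      rw [hfil]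

theorem outLoop_eq (arr ret : List Int) (N : Nat) :
    outLoop arr ret (N : Int)
      = ((List.range N).filter (fun i => decide (ret.getD i 0 ≠ 0))).map (fun (i : Nat) => PySem.List.pyGetD arr (i : Int) 0) := by
  unfold outLoop
  rw [PySem.List.pyRange_zero_natCast, List.foldl_map, outFold]
  simp

theorem getD_rep_app (P Q : Nat) (j : Nat) :
    (List.replicate P (1 : Int) ++ List.replicate Q 0).getD j 0 = if j < P then 1 else 0 := by
  by_cases h : j < P
  · rw [List.getD_eq_getElem?_getD, List.getElem?_append_left (by simpa using h)]
    simp [List.getElem?_replicate, h]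
  · rw [List.getD_eq_getElem?_getD, List.getElem?_append_right (by simpa using h)]
    simp only [List.getElem?_replicate]
    split_ifs <;> simp [h]

theorem getD_rep_zero (N j : Nat) : (List.replicate N (0 : Int)).getD j 0 = 0 := by
  rw [List.getD_eq_getElem?_getD]
  simp only [List.getElem?_replicate]
  split_ifs <;> simp

theorem rosterFoldAux (p : Int) : ∀ (l : List Nat) (acc : List (Int × Int) × List (Int × Int)),
    l.foldl (fun (st : List (Int × Int) × List (Int × Int)) (i : Nat) =>
        if (i : Int) < p then (st.1 ++ [((0 : Int), (i : Int))], st.2) else (st.1, st.2 ++ [((0 : Int), (i : Int))])) acc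
      = (acc.1 ++ (l.filter (fun (i : Nat) => decide ((i : Int) < p))).map (fun (i : Nat) => ((0 : Int), (i : Int))),
         acc.2 ++ (l.filter (fun (i : Nat) => !decide ((i : Int) < p))).map (fun (i : Nat) => ((0 : Int), (i : Int)))) := by
  intro l
  induction l with
  | nil => intro acc; simp
  | cons x t ih =>
    intro acc
    rw [List.foldl_cons]
    by_cases hx : (x : Int) < p
    · rw [if_pos hx, ih]
      have h1 : List.filter (fun (i : Nat) => decide ((i : Int) < p)) (x :: t)
          = x :: List.filter (fun (i : Nat) => decide ((i : Int) < p)) t := by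
        rw [List.filter_cons]
        simp [hx]
      have h2 : List.filter (fun (i : Nat) => !decide ((i : Int) < p)) (x :: t)
          = List.filter (fun (i : Nat) => !decide ((i : Int) < p)) t := by
        rw [List.filter_cons]
        simp [hx]
      rw [h1, h2, List.map_cons]
      simp [List.append_assoc]
    · rw [if_neg hx, ih]
      have h1 : List.filter (fun (i : Nat) => decide ((i : Int) < p)) (x :: t)
          = List.filter (fun (i : Nat) => decide ((i : Int) < p)) t := by
        rw [List.filter_cons]
        simp [hx]
      have h2 : List.filter (fun (i : Nat) => !decide ((i : Int) < p)) (x :: t)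
          = x :: List.filter (fun (i : Nat) => !decide ((i : Int) < p)) t := by
        rw [List.filter_cons]
        simp [hx]
      rw [h1, h2, List.map_cons]
      simp [List.append_assoc]

theorem rosterLoop_eq (p : Int) (N : Nat) :
    (PySem.List.pyRange 0 (N : Int) 1).foldl
      (fun (st : List (Int × Int) × List (Int × Int)) i =>
        if i < p then (st.1 ++ [((0 : Int), i)], st.2) else (st.1, st.2 ++ [((0 : Int), i)])) ([], [])
    = (((List.range N).filter (fun (i : Nat) => decide ((i : Int) < p))).map (fun (i : Nat) => ((0 : Int), (i : Int))),
       ((List.range N).filter (fun (i : Nat) => !decide ((i : Int) < p))).map (fun (i : Nat) => ((0 : Int), (i : Int)))) := by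
  rw [PySem.List.pyRange_zero_natCast, List.foldl_map, rosterFoldAux]
  simp

theorem filter_range_lt (P : Nat) : ∀ (N : Nat), P ≤ N →
    (List.range N).filter (fun i => decide (i < P)) = List.range P := by
  intro N
  induction N with
  | zero =>
    intro h
    have : P = 0 := by omega
    simp [this]
  | succ n ih =>
    intro h
    rw [List.range_succ, List.filter_append]
    by_cases hP : P ≤ n
    · rw [ih hP]
      have : List.filter (fun i => decide (i < P)) [n] = [] := by
        simp
        omega
      rw [this, List.append_nil]
    · have hPn : P = n + 1 := by omega
      subst hPn
      have h1 : List.filter (fun i => decide (i < n + 1)) (List.range n) = List.range n := by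
        apply List.filter_eq_self.mpr
        intro a ha
        simp only [decide_eq_true_eq]
        have := List.mem_range.mp ha
        omega
      have h2 : List.filter (fun i => decide (i < n + 1)) [n] = [n] := by
        simp
      rw [h1, h2, ← List.range_succ]
  termination_by N => N

theorem filter_range_ge (P : Nat) : ∀ (N : Nat), P ≤ N →
    (List.range N).filter (fun i => !decide (i < P)) = (List.range (N - P)).map (fun k => P + k) := by
  intro N
  induction N with
  | zero =>
    intro h
    simp
  | succ n ih =>
    intro h
    rw [List.range_succ, List.filter_append]
    by_cases hP : P ≤ n
    · rw [ih hP]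
      have h2 : List.filter (fun i => !decide (i < P)) [n] = [n] := by
        simp
        omega
      rw [h2]
      have hr : n + 1 - P = (n - P) + 1 := by omega
      rw [hr, List.range_succ, List.map_append]
      have : P + (n - P) = n := by omega
      simp [this]
    · have hPn : P = n + 1 := by omega
      subst hPn
      have h1 : List.filter (fun i => !decide (i < n + 1)) (List.range n) = [] := by
        apply List.filter_eq_nil_iff.mpr
        intro a ha
        have := List.mem_range.mp ha
        simp
        omega
      have h2 : List.filter (fun i => !decide (i < n + 1)) [n] = [] := by
        simp
      rw [h1, h2]
      simp

theorem init_inv (p : Int) (N P : Nat) (hpcast : (P : Int) = p) (hPle : P ≤ N) :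
    LoopInv N P 0 (List.replicate P 1 ++ List.replicate ((N : Int) - p).toNat 0) (List.replicate N 0)
      ((List.range P).map (fun (k : Nat) => ((0 : Int), (k : Int))))
      ((List.range (N - P)).map (fun (k : Nat) => ((0 : Int), p + (k : Int)))) := by
  have hQ : ((N : Int) - p).toNat = N - P := by omega
  set ret0 : List Int := List.replicate P 1 ++ List.replicate ((N : Int) - p).toNat 0 with hret0def
  have hret0eq : ret0 = List.replicate P 1 ++ List.replicate (N - P) 0 := by
    rw [hret0def, hQ]
  set time0 : List Int := List.replicate N (0 : Int) with htime0def
  have hret0len : ret0.length = N := by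
    simp [hret0eq]
    omega
  have hret0at : ∀ j : Nat, ret0.getD j 0 = if j < P then 1 else 0 := by
    rw [hret0eq]
    exact fun j => getD_rep_app P (N - P) j
  have htime0at : ∀ j : Nat, time0.getD j 0 = 0 := fun j => getD_rep_zero N j
  refine ⟨hret0len, by simp [htime0def], ?_, ?_, ?_, ?_, ?_⟩
  · intro i _
    rw [hret0at i]
    by_cases h : i < P <;> simp [h]
  · have hnodL : ((List.range P).map (fun (k : Nat) => ((0 : Int), (k : Int)))).Nodup :=
      nodup_pairs List.nodup_range
    rw [List.perm_ext_iff_of_nodup hnodL (nodup_onSpec ret0 time0 0)]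
    intro a
    simp only [List.mem_map, List.mem_range]
    constructor
    · rintro ⟨k, hk, rfl⟩
      refine mem_onSpec.mpr ⟨k, by omega, ?_, ?_⟩
      · rw [hret0at k, if_pos hk]
      · rw [htime0at k]
        simp
    · intro ha
      obtain ⟨i, hi, hri, hpair⟩ := mem_onSpec.mp ha
      have hiP : i < P := by
        by_contra hc
        rw [hret0at i, if_neg hc] at hri
        omega
      refine ⟨i, hiP, ?_⟩
      rw [hpair, htime0at i]
      simp
  · have hnodL : ((List.range (N - P)).map (fun (k : Nat) => ((0 : Int), p + (k : Int)))).Nodup := by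
      refine List.nodup_range.map ?_
      intro i j hij
      simp only [Prod.mk.injEq] at hij
      omega
    rw [List.perm_ext_iff_of_nodup hnodL (nodup_offSpec ret0 time0)]
    intro a
    simp only [List.mem_map, List.mem_range]
    constructor
    · rintro ⟨k, hk, rfl⟩
      refine mem_offSpec.mpr ⟨P + k, by omega, ?_, ?_⟩
      · rw [hret0at (P + k), if_neg (by omega)]
      · rw [htime0at (P + k)]
        have : p + (k : Int) = ((P + k : Nat) : Int) := by
          push_cast
          omega
        rw [this]
    · intro ha
      obtain ⟨i, hi, hri, hpair⟩ := mem_offSpec.mp ha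
      have hiP : ¬ i < P := by
        intro hc
        rw [hret0at i, if_pos hc] at hri
        omega
      refine ⟨i - P, by omega, ?_⟩
      rw [hpair, htime0at i]
      have : p + ((i - P : Nat) : Int) = (i : Int) := by
        push_cast [Nat.cast_sub (by omega : P ≤ i)]
        omega
      rw [this]
  · simp
  · simp

theorem f_spec_aux : ∀ (arr : List Int) (m p : Int), Pre_f arr m p → f arr m p = f_alt arr m p := by
  intro arr m p hpre
  set N := arr.length with hNdef
  by_cases hple : 0 ≤ p ∧ p ≤ (N : Int)
  case pos =>
    obtain ⟨hp0, hpN⟩ := hple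
    have hpcast : ((p.toNat : Int)) = p := Int.toNat_of_nonneg hp0
    set P := p.toNat with hPdef
    have hPle : P ≤ N := by omega
    set ret0 : List Int := List.replicate P 1 ++ List.replicate ((N : Int) - p).toNat 0 with hret0def
    set time0 : List Int := List.replicate N (0 : Int) with htime0def
    set on0 : List (Int × Int) := (List.range P).map (fun (k : Nat) => ((0 : Int), (k : Int))) with hon0def
    set off0 : List (Int × Int) := (List.range (N - P)).map (fun (k : Nat) => ((0 : Int), p + (k : Int))) with hoff0def
    have hinit : LoopInv N P 0 ret0 time0 on0 off0 := init_inv p N P hpcast hPle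
    have hst0 : (PySem.List.pyRange 0 (N : Int) 1).foldl
        (fun (st : List (Int × Int) × List (Int × Int)) i =>
          if i < p then (st.1 ++ [((0 : Int), i)], st.2) else (st.1, st.2 ++ [((0 : Int), i)])) ([], [])
        = (on0, off0) := by
      rw [rosterLoop_eq]
      have hpred : ∀ i : Nat, (fun (i : Nat) => decide ((i : Int) < p)) i = (fun i => decide (i < P)) i := by
        intro i
        simp only [← hpcast, decide_eq_decide]
        omega
      rw [List.filter_congr (fun i _ => hpred i), filter_range_lt P N hPle]
      have hpred2 : ∀ i : Nat, (fun (i : Nat) => !decide ((i : Int) < p)) i = (fun i => !decide (i < P)) i := by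
        intro i
        have := hpred i
        simp only at this ⊢
        rw [this]
      rw [List.filter_congr (fun i _ => hpred2 i), filter_range_ge P N hPle]
      rw [List.map_map, hon0def, hoff0def]
      congr 1
      apply List.map_congr_left
      intro k _
      simp only [Function.comp_apply]
      rw [← hpcast]
      push_cast
      ring_nf
    have hInvM :
        LoopInv N P ((m.toNat : Nat) : Int)
          (((List.range m.toNat).foldl (fun (st : List Int × List Int) (_ : Nat) => stepA st.1 st.2 (N : Int)) (ret0, time0)).1)
          (((List.range m.toNat).foldl (fun (st : List Int × List Int) (_ : Nat) => stepA st.1 st.2 (N : Int)) (ret0, time0)).2)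
          (((List.range m.toNat).foldl (fun (st : List (Int × Int) × List (Int × Int)) (k : Nat) => stepB st.1 st.2 (1 + (k : Int))) (on0, off0)).1)
          (((List.range m.toNat).foldl (fun (st : List (Int × Int) × List (Int × Int)) (k : Nat) => stepB st.1 st.2 (1 + (k : Int))) (on0, off0)).2) := by
      rcases hpre with ⟨h1, h2⟩ | h1
      · have hP0 : 0 < P := by omega
        have hPN : P < N := by omega
        have hloop : ∀ (M : Nat),
            LoopInv N P (M : Int)
              (((List.range M).foldl (fun (st : List Int × List Int) (_ : Nat) => stepA st.1 st.2 (N : Int)) (ret0, time0)).1)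
              (((List.range M).foldl (fun (st : List Int × List Int) (_ : Nat) => stepA st.1 st.2 (N : Int)) (ret0, time0)).2)
              (((List.range M).foldl (fun (st : List (Int × Int) × List (Int × Int)) (k : Nat) => stepB st.1 st.2 (1 + (k : Int))) (on0, off0)).1)
              (((List.range M).foldl (fun (st : List (Int × Int) × List (Int × Int)) (k : Nat) => stepB st.1 st.2 (1 + (k : Int))) (on0, off0)).2) := by
          intro M
          induction M with
          | zero => simpa using hinit
          | succ M ih =>
            rw [List.range_succ, List.foldl_append, List.foldl_append]
            simp only [List.foldl_cons, List.foldl_nil]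
            have hstep := step_inv N P hP0 hPN (M : Int) _ _ _ _ ih
            have hc1 : (1 : Int) + (M : Int) = (M : Int) + 1 := by ring
            have hc2 : ((M + 1 : Nat) : Int) = (M : Int) + 1 := by push_cast; ring
            rw [hc1, hc2]
            exact hstep
        exact hloop m.toNat
      · have hm0 : m.toNat = 0 := by omega
        rw [hm0]
        simpa using hinit
    have hfA : f arr m p =
        outLoop arr (((List.range m.toNat).foldl (fun (st : List Int × List Int) (_ : Nat) => stepA st.1 st.2 (N : Int)) (ret0, time0)).1) (N : Int) := by
      simp only [f]
      rw [PySem.List.pyRange_one 0 m, List.foldl_map]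
      have : ((m - 0 : Int)).toNat = m.toNat := by omega
      rw [this]
      try rfl
    have hfB : f_alt arr m p =
        (PySem.List.sorted ((((List.range m.toNat).foldl (fun (st : List (Int × Int) × List (Int × Int)) (k : Nat) => stepB st.1 st.2 (1 + (k : Int))) (on0, off0)).1).map Prod.snd) (fun i => i)).map
          (fun i => PySem.List.pyGetD arr i 0) := by
      simp only [f_alt]
      rw [hst0]
      rw [PySem.List.pyRange_one 1 (m + 1), List.foldl_map]
      have : ((m + 1 - 1 : Int)).toNat = m.toNat := by omega
      rw [this]
      try rfl
    obtain ⟨hlrF, _, hvalsF, honF, _, _, _⟩ := hInvM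
    set retF := ((List.range m.toNat).foldl (fun (st : List Int × List Int) (_ : Nat) => stepA st.1 st.2 (N : Int)) (ret0, time0)).1 with hretF
    set onF := ((List.range m.toNat).foldl (fun (st : List (Int × Int) × List (Int × Int)) (k : Nat) => stepB st.1 st.2 (1 + (k : Int))) (on0, off0)).1 with honFdef
    set t1F := ((List.range m.toNat).foldl (fun (st : List Int × List Int) (_ : Nat) => stepA st.1 st.2 (N : Int)) (ret0, time0)).2 with ht1F
    have hsorted : PySem.List.sorted (onF.map Prod.snd) (fun i => i)
        = ((List.range N).filter (fun i => retF.getD i 0 == 1)).map (fun (i : Nat) => (i : Int)) := by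
      apply PySem.List.sorted_eq_of_perm_of_pairwise_lt
      · have hmapeq : (onSpec retF t1F (m.toNat : Int)).map Prod.snd
            = ((List.range N).filter (fun i => retF.getD i 0 == 1)).map (fun (i : Nat) => (i : Int)) := by
          unfold onSpec
          rw [List.map_map, hlrF]
          simp [Function.comp_def]
        rw [← hmapeq]
        exact (honF.map Prod.snd).symm
      · have hp1 : (((List.range N).filter (fun i => retF.getD i 0 == 1))).Pairwise (· < ·) :=
          List.Pairwise.sublist List.filter_sublist List.pairwise_lt_range
        refine List.Pairwise.map (fun (i : Nat) => (i : Int)) ?_ hp1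
        intro a b hab
        show ((a : Int) < (b : Int))
        exact_mod_cast hab
    rw [hfA, hfB, outLoop_eq, hsorted, List.map_map]
    have hfc : ∀ i ∈ List.range N, (decide (retF.getD i 0 ≠ 0)) = (retF.getD i 0 == 1) := by
      intro i hi
      rw [List.getD_eq_getElem?_getD]
      rcases hvalsF i (List.mem_range.mp hi) with h | h <;>
        (rw [List.getD_eq_getElem?_getD] at h; simp [h])
    rw [List.filter_congr hfc]
    rfl
  case neg =>
    -- p out of range: Pre_f forces m ≤ 0, zero rounds on both sides
    have hm : m ≤ 0 := by
      rcases hpre with ⟨h1, h2⟩ | h1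
      · exact absurd ⟨by omega, by omega⟩ hple
      · exact h1
    have hfB0 : f_alt arr m p =
        (PySem.List.sorted
          ((((List.range N).filter (fun (i : Nat) => decide ((i : Int) < p))).map (fun (i : Nat) => ((0 : Int), (i : Int)))).map Prod.snd)
          (fun i => i)).map (fun i => PySem.List.pyGetD arr i 0) := by
      simp only [f_alt]
      rw [rosterLoop_eq, PySem.List.pyRange_one_eq_nil (by omega : m + 1 ≤ 1), List.foldl_nil]
    have hfA0 : f arr m p =
        ((List.range N).filter (fun i => decide (((List.replicate p.toNat (1 : Int) ++ List.replicate ((N : Int) - p).toNat 0)).getD i 0 ≠ 0))).map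
          (fun (i : Nat) => PySem.List.pyGetD arr (i : Int) 0) := by
      simp only [f]
      rw [PySem.List.pyRange_one_eq_nil (by omega : m ≤ 0), List.foldl_nil, outLoop_eq]
    by_cases hneg : p < 0
    · -- nobody on court
      have hranil : ∀ i : Nat, i < N →
          ((List.replicate p.toNat (1 : Int) ++ List.replicate ((N : Int) - p).toNat 0)).getD i 0 = 0 := by
        intro i _
        have hpz : p.toNat = 0 := by omega
        rw [hpz]
        simp only [List.replicate_zero, List.nil_append]
        exact getD_rep_zero _ i
      have h1 : ((List.range N).filter (fun i => decide (((List.replicate p.toNat (1 : Int) ++ List.replicate ((N : Int) - p).toNat 0)).getD i 0 ≠ 0))) = [] := by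
        apply List.filter_eq_nil_iff.mpr
        intro i hi
        have := hranil i (List.mem_range.mp hi)
        rw [List.getD_eq_getElem?_getD] at this
        simp [this]
      have h2 : ((List.range N).filter (fun (i : Nat) => decide ((i : Int) < p))) = [] := by
        apply List.filter_eq_nil_iff.mpr
        intro i _
        simp only [decide_eq_true_eq]
        omega
      rw [hfA0, hfB0, h1, h2]
      simp
      rfl
    · -- p > n: everybody on court
      have hNp : (N : Int) < p := by omega
      have hra1 : ∀ i : Nat, i < N →
          ((List.replicate p.toNat (1 : Int) ++ List.replicate ((N : Int) - p).toNat 0)).getD i 0 = 1 := by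
        intro i hi
        rw [getD_rep_app p.toNat (((N : Int) - p).toNat) i, if_pos (by omega)]
      have h1 : ((List.range N).filter (fun i => decide (((List.replicate p.toNat (1 : Int) ++ List.replicate ((N : Int) - p).toNat 0)).getD i 0 ≠ 0))) = List.range N := by
        apply List.filter_eq_self.mpr
        intro i hi
        have := hra1 i (List.mem_range.mp hi)
        rw [List.getD_eq_getElem?_getD] at this
        simp [this]
      have h2 : ((List.range N).filter (fun (i : Nat) => decide ((i : Int) < p))) = List.range N := by
        apply List.filter_eq_self.mpr
        intro i hi
        have := List.mem_range.mp hi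
        simp only [decide_eq_true_eq]
        omega
      rw [hfA0, hfB0, h1, h2, List.map_map]
      have hcomp : ((List.range N).map (Prod.snd ∘ fun (i : Nat) => ((0 : Int), (i : Int))))
          = (List.range N).map (fun (i : Nat) => (i : Int)) := by
        simp [Function.comp_def]
      rw [hcomp]
      have hsorted : PySem.List.sorted ((List.range N).map (fun (i : Nat) => (i : Int))) (fun i => i)
          = (List.range N).map (fun (i : Nat) => (i : Int)) := by
        apply PySem.List.sorted_eq_of_perm_of_pairwise_lt _ _ _ (List.Perm.refl _)
        refine List.Pairwise.map (fun (i : Nat) => (i : Int)) ?_ List.pairwise_lt_range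
        intro a b hab
        show ((a : Int) < (b : Int))
        exact_mod_cast hab
      rw [hsorted, List.map_map]
      simp [Function.comp_def]

-- ===== VERDICT (by name: the statement is the Claim_ definition above) =====
theorem f_spec : Claim_equal_f := by
  intro arr m p _ hpre
  unfold Spec_f
  exact f_spec_aux arr m p hpre
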